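-- pv_equiv track=rewrite | github.com/gguip1/TIL | archives/BOJ/6504/6504.py | solve
-- ===== SOURCE A (Python) =====
-- def get_fibo():
--     fibo = [1, 2]
--
--     x = 0
--     y = 1
--
--     while fibo[x] + fibo[y] < 25000:
--         fibo.append(fibo[x] + fibo[y])
--         x += 1
--         y += 1
--
--     return fibo
--
-- def solve(x):
--     fibo = get_fibo()
--     indexes = []
--
--     while x != 0:
--         index = 0
--         while index < 21 and fibo[index] <= x:
--             index += 1
--         index -= 1
--         x -= fibo[index]
--         indexes.append(index)
--
--     result = 0
--     for index in indexes:
--         index -= 1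
--         if index >= 0:
--             result += fibo[index]
--
--     return result
-- ===== SOURCE B (Python) =====
-- def solve(x):
--     fibo = [1, 2]
--     while fibo[-2] + fibo[-1] < 25000:
--         fibo.append(fibo[-2] + fibo[-1])
--
--     result = 0
--     if x >= fibo[-1]:
--         result += (x // fibo[-1]) * fibo[-2]
--         x = x % fibo[-1]
--     for i in range(len(fibo) - 2, -1, -1):
--         if fibo[i] <= x:
--             x -= fibo[i]
--             if i >= 1:
--                 result += fibo[i - 1]
--     return result
-- ===== Notes on version B (the rewrite author's own statement) =====
-- stated objective: alternative
-- what changed: Replaced A's three phases (repeated rescanning greedy over the fibo table, an index list, and a separate shift-and-sum pass) by a closed-form divmod for the repeated largest Fibonacci plus a single descending sweep that accumulates the shifted sum directly.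
import Mathlib
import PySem

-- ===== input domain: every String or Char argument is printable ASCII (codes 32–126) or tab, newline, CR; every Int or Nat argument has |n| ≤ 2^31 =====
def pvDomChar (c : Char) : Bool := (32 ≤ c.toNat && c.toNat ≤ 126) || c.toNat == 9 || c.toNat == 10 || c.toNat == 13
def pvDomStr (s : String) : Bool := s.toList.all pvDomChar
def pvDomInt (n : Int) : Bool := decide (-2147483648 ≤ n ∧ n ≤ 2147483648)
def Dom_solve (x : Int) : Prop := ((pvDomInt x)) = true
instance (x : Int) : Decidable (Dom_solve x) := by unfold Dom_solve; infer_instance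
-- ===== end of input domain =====

-- B replaces A's three phases (repeated rescanning greedy, index list, shift-and-sum pass)
-- by a closed-form divmod for the repeated top Fibonacci plus one descending sweep: objective 'alternative'.

-- ===== PORT A =====
-- get_fibo: while loop ported with fuel (100 ≥ the 19 iterations actually run; fuel only makes it total)
def getFiboGo : Nat → List Int → Int → Int → List Int
  | 0, fibo, _, _ => fibo
  | n+1, fibo, x, y =>
    let s := ((PySem.List.pyGet? fibo x).getD 0) + ((PySem.List.pyGet? fibo y).getD 0)
    if s < 25000 then getFiboGo n (fibo ++ [s]) (x + 1) (y + 1) else fibo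

def getFibo : List Int := getFiboGo 100 [1, 2] 0 1

-- inner 'while index < 21 and fibo[index] <= x' loop (runs ≤ 21 steps; fuel 22 suffices)
def solveScan : Nat → List Int → Int → Int → Int
  | 0, _, _, index => index
  | n+1, fibo, x, index =>
    if index < 21 ∧ ((PySem.List.pyGet? fibo index).getD 0) ≤ x then
      solveScan n fibo x (index + 1)
    else index

-- outer 'while x != 0' loop; fuel x.toNat+1 suffices since each step subtracts ≥ 1 when x > 0
def solveGo : Nat → List Int → Int → List Int → List Int
  | 0, _, _, idxs => idxs
  | n+1, fibo, x, idxs =>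
    if x ≠ 0 then
      let index := solveScan 22 fibo x 0 - 1
      solveGo n fibo (x - (PySem.List.pyGet? fibo index).getD 0) (idxs ++ [index])
    else idxs

def solve (x : Int) : Int :=
  let fibo := getFibo
  let indexes := solveGo (x.toNat + 1) fibo x []
  indexes.foldl (fun result index =>
    if index - 1 ≥ 0 then result + (PySem.List.pyGet? fibo (index - 1)).getD 0 else result) 0

-- ===== PORT B =====
def getFiboAltGo : Nat → List Int → List Int
  | 0, fibo => fibo
  | n+1, fibo =>
    let s := ((PySem.List.pyGet? fibo (-2)).getD 0) + ((PySem.List.pyGet? fibo (-1)).getD 0)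
    if s < 25000 then getFiboAltGo n (fibo ++ [s]) else fibo

def solve_alt (x : Int) : Int :=
  let fibo := getFiboAltGo 100 [1, 2]
  let last := (PySem.List.pyGet? fibo (-1)).getD 0
  let result0 : Int := if x ≥ last then (PySem.Int.floordiv x last) * ((PySem.List.pyGet? fibo (-2)).getD 0) else 0
  let x1 : Int := if x ≥ last then PySem.Int.mod x last else x
  let st := (PySem.List.pyRange ((fibo.length : Int) - 2) (-1) (-1)).foldl
    (fun (st : Int × Int) i =>
      let f := (PySem.List.pyGet? fibo i).getD 0
      if f ≤ st.1 then
        (st.1 - f, if i ≥ 1 then st.2 + (PySem.List.pyGet? fibo (i - 1)).getD 0 else st.2)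
      else st) (x1, result0)
  st.2

-- ===== PRECONDITION & SPEC =====
-- Pre_ excludes x < 0, on which A's outer while loop never terminates (Python diverges).
def Pre_solve (x : Int) : Prop := 0 ≤ x
instance (x : Int) : Decidable (Pre_solve x) := by unfold Pre_solve; infer_instance
def pvWitness_solve : Int := 100

def Spec_solve (x : Int) (out : Int) : Prop := out = solve_alt x
instance (x : Int) (out : Int) : Decidable (Spec_solve x out) := by unfold Spec_solve; infer_instance

-- ===== CLAIM (what is proved, stated in full; the proofs are below) =====
def Claim_equal_solve : Prop := ∀ (x : Int), Dom_solve x → Pre_solve x → Spec_solve x (solve x)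

-- ===== LEMMAS AND PROOFS =====

-- the Fibonacci table both programs build
def fibL : List Int := [1, 2, 3, 5, 8, 13, 21, 34, 55, 89, 144, 233, 377, 610, 987, 1597, 2584, 4181, 6765, 10946, 17711]

def F (i : Int) : Int := (PySem.List.pyGet? fibL i).getD 0

lemma F_mono : ∀ i j : Fin 21, (i : Nat) ≤ j → F i ≤ F j := by decide

lemma F_pos : ∀ i : Fin 21, 1 ≤ F i := by decide

lemma fib_add : ∀ i : Fin 19, F ((i : Nat) + 2) = F ((i : Nat) + 1) + F (i : Nat) := by decide

lemma F_mono' (a b : Nat) (hab : a ≤ b) (hb : b ≤ 20) : F a ≤ F b :=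
  F_mono ⟨a, by omega⟩ ⟨b, by omega⟩ hab

lemma F_pos' (a : Nat) (ha : a ≤ 20) : 1 ≤ F a := F_pos ⟨a, by omega⟩

lemma fib_add' (a : Nat) (ha : a ≤ 18) : F ((a : Int) + 2) = F ((a : Int) + 1) + F (a : Int) :=
  fib_add ⟨a, by omega⟩

-- greedy index: largest m ≤ 20 with F m ≤ x
def K (x : Int) : Nat := Nat.findGreatest (fun m => F m ≤ x) 20

lemma K_le (x : Int) : K x ≤ 20 := Nat.findGreatest_le 20

lemma K_spec (x : Int) (hx : 1 ≤ x) : F (K x) ≤ x :=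
  Nat.findGreatest_spec (P := fun m => F m ≤ x) (Nat.zero_le 20) (by
    show F ((0 : Nat) : Int) ≤ x
    have h0 : F ((0 : Nat) : Int) = 1 := by decide
    omega)

lemma K_ge (x : Int) (m : Nat) (hm : m ≤ 20) (h : F m ≤ x) : m ≤ K x :=
  Nat.le_findGreatest hm h

lemma K_max (x : Int) (m : Nat) (hm : m ≤ 20) (h : K x < m) : ¬ F m ≤ x :=
  Nat.findGreatest_is_greatest h hm

lemma scan_succ (n : Nat) (x idx : Int) :
    solveScan (n+1) fibL x idx =
      if idx < 21 ∧ F idx ≤ x then solveScan n fibL x (idx + 1) else idx := rfl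

-- scan characterization
lemma scan_eq (x : Int) (j : Nat) (hj : j ≤ 20)
    (hle : ∀ m : Nat, m ≤ j → F m ≤ x)
    (hstop : j = 20 ∨ ¬ F ((j : Int) + 1) ≤ x) :
    solveScan 22 fibL x 0 = (j : Int) + 1 := by
  have run : ∀ (n : Nat) (idx : Nat), idx ≤ j + 1 → (j + 1) - idx < n →
      solveScan n fibL x (idx : Int) = (j : Int) + 1 := by
    intro n
    induction n with
    | zero => intro idx _ h; omega
    | succ n ih =>
      intro idx hidx hfuel
      rw [scan_succ]
      by_cases htop : idx = j + 1
      · subst htop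
        rw [if_neg]
        · push_cast; ring
        · rcases hstop with h20 | hng
          · subst h20; intro hc; have := hc.1; omega
          · intro hc
            apply hng
            have hc2 := hc.2
            push_cast at hc2 ⊢
            exact hc2
      · have hlt : idx ≤ j := by omega
        rw [if_pos]
        · have hcast : (idx : Int) + 1 = ((idx + 1 : Nat) : Int) := by push_cast; ring
          rw [hcast]
          exact ih (idx + 1) (by omega) (by omega)
        · exact ⟨by exact_mod_cast Nat.lt_succ_of_le (le_trans hlt hj), hle idx hlt⟩
  exact_mod_cast run 22 0 (by omega) (by omega)

lemma scan_K (x : Int) (hx : 1 ≤ x) : solveScan 22 fibL x 0 = (K x : Int) + 1 := by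
  have hKle := K_le x
  apply scan_eq x (K x) hKle
  · intro m hm
    calc F m ≤ F (K x) := F_mono' m (K x) hm hKle
    _ ≤ x := K_spec x hx
  · rcases Nat.lt_or_ge (K x) 20 with h | h
    · right
      have hng := K_max x (K x + 1) (by omega) (by omega)
      have hc : ((K x + 1 : Nat) : Int) = (K x : Int) + 1 := by push_cast; ring
      rw [hc] at hng
      exact hng
    · left; omega

lemma go_append (n : Nat) : ∀ (x : Int) (idxs : List Int),
    solveGo n fibL x idxs = idxs ++ solveGo n fibL x [] := by
  induction n with
  | zero => intro x idxs; simp [solveGo]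
  | succ n ih =>
    intro x idxs
    simp only [solveGo]
    by_cases hx : x = 0
    · simp [hx]
    · rw [if_pos hx, if_pos hx]
      rw [ih _ (idxs ++ _), ih _ ([] ++ _)]
      simp

lemma go_zero (n : Nat) (idxs : List Int) : solveGo n fibL 0 idxs = idxs := by
  cases n <;> simp [solveGo]

lemma go_succ (n : Nat) (x : Int) (hx : x ≠ 0) :
    solveGo (n+1) fibL x [] =
      (solveScan 22 fibL x 0 - 1) :: solveGo n fibL (x - F (solveScan 22 fibL x 0 - 1)) [] := by
  show (if x ≠ 0 then _ else _) = _
  rw [if_pos hx]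
  rw [go_append]
  rfl

lemma FK_bounds (x : Int) (hx : 1 ≤ x) : 1 ≤ F (K x) ∧ F (K x) ≤ x := by
  exact ⟨F_pos' (K x) (K_le x), K_spec x hx⟩

lemma go_fuel_aux (t : Nat) : ∀ (x : Int), 0 ≤ x → x.toNat ≤ t → ∀ n m : Nat, x.toNat < n → x.toNat < m →
    solveGo n fibL x [] = solveGo m fibL x [] := by
  induction t with
  | zero =>
    intro x hx ht n m hn hm
    have hx0 : x = 0 := by omega
    subst hx0
    rw [go_zero, go_zero]
  | succ t ih =>
    intro x hx ht n m hn hm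
    by_cases hx0 : x = 0
    · subst hx0; rw [go_zero, go_zero]
    · obtain ⟨n, rfl⟩ : ∃ n', n = n' + 1 := ⟨n - 1, by omega⟩
      obtain ⟨m, rfl⟩ : ∃ m', m = m' + 1 := ⟨m - 1, by omega⟩
      rw [go_succ _ _ hx0, go_succ _ _ hx0]
      have hx1 : 1 ≤ x := by omega
      rw [scan_K x hx1]
      have hsimp : (K x : Int) + 1 - 1 = (K x : Int) := by ring
      rw [hsimp]
      obtain ⟨hF1, hF2⟩ := FK_bounds x hx1
      congr 1
      exact ih (x - F (K x)) (by omega) (by omega) n m (by omega) (by omega)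

lemma go_fuel (x : Int) (hx : 0 ≤ x) : ∀ n m : Nat, x.toNat < n → x.toNat < m →
    solveGo n fibL x [] = solveGo m fibL x [] :=
  go_fuel_aux x.toNat x hx (le_refl _)

-- the result fold
def resF (r i : Int) : Int := if i - 1 ≥ 0 then r + F (i - 1) else r

lemma solve_eq (x : Int) : solve x = (solveGo (x.toNat + 1) fibL x []).foldl resF 0 := rfl

lemma res_shift : ∀ (l : List Int) (r : Int), l.foldl resF r = r + l.foldl resF 0
  | [], r => by simp
  | a :: l, r => by
    simp only [List.foldl_cons]
    rw [res_shift l (resF r a), res_shift l (resF 0 a)]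
    unfold resF
    split_ifs <;> omega

lemma solve_succ (x : Int) (hx : 1 ≤ x) :
    solve x = (if (K x : Int) - 1 ≥ 0 then F ((K x : Int) - 1) else 0) + solve (x - F (K x)) := by
  obtain ⟨hF1, hF2⟩ := FK_bounds x hx
  rw [solve_eq x, solve_eq (x - F (K x))]
  rw [go_succ _ _ (by omega), scan_K x hx]
  have hsimp : (K x : Int) + 1 - 1 = (K x : Int) := by ring
  rw [hsimp]
  rw [go_fuel (x - F (K x)) (by omega) x.toNat ((x - F (K x)).toNat + 1) (by omega) (by omega)]
  simp only [List.foldl_cons]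
  rw [res_shift]
  unfold resF
  split_ifs <;> omega

-- B side: descending index list and sweep step
def desc : Nat → List Int
  | 0 => [0]
  | n+1 => ((n : Int) + 1) :: desc n

def step (st : Int × Int) (i : Int) : Int × Int :=
  let f := (PySem.List.pyGet? fibL i).getD 0
  if f ≤ st.1 then
    (st.1 - f, if i ≥ 1 then st.2 + (PySem.List.pyGet? fibL (i - 1)).getD 0 else st.2)
  else st

lemma alt_eq (x : Int) : solve_alt x =
    ((desc 19).foldl step
      ((if x ≥ 17711 then PySem.Int.mod x 17711 else x),
       (if x ≥ 17711 then PySem.Int.floordiv x 17711 * 10946 else 0))).2 := rfl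

lemma step_def (x r i : Int) : step (x, r) i =
    if F i ≤ x then (x - F i, if i ≥ 1 then r + F (i - 1) else r) else (x, r) := rfl

lemma sweep_shift : ∀ (l : List Int) (x r : Int),
    (l.foldl step (x, r)).1 = (l.foldl step (x, 0)).1 ∧
    (l.foldl step (x, r)).2 = r + (l.foldl step (x, 0)).2
  | [], x, r => by simp
  | a :: l, x, r => by
    simp only [List.foldl_cons, step_def]
    by_cases hf : F a ≤ x
    · rw [if_pos hf, if_pos hf]
      by_cases ha : a ≥ 1
      · rw [if_pos ha, if_pos ha]
        obtain ⟨h1, h2⟩ := sweep_shift l (x - F a) (r + F (a - 1))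
        obtain ⟨h1', h2'⟩ := sweep_shift l (x - F a) (0 + F (a - 1))
        refine ⟨by rw [h1, h1'], ?_⟩
        rw [h2, h2']
        ring
      · rw [if_neg ha, if_neg ha]
        exact sweep_shift l (x - F a) r
    · rw [if_neg hf, if_neg hf]
      exact sweep_shift l x r

lemma main_sweep : ∀ (i : Nat), i ≤ 19 → ∀ x : Int, 0 ≤ x → x < F ((i : Int) + 1) →
    solve x = ((desc i).foldl step (x, 0)).2 := by
  intro i
  induction i with
  | zero =>
    intro _ x hx hlt
    have h1 : F ((0 : Nat) : Int) + 0 = 2 - 1 := by decide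
    have h2 : x < 2 := by
      have h3 : F (((0 : Nat) : Int) + 1) = 2 := by decide
      rw [h3] at hlt
      exact hlt
    have : x = 0 ∨ x = 1 := by omega
    rcases this with rfl | rfl <;> decide
  | succ i ih =>
    intro hi x hx hlt
    have hcast : ((i + 1 : Nat) : Int) = (i : Int) + 1 := by push_cast; ring
    rw [hcast] at hlt
    have hlt2 : x < F ((i : Int) + 2) := by
      have e : (i : Int) + 1 + 1 = (i : Int) + 2 := by ring
      rwa [e] at hlt
    show solve x = ((((i : Int) + 1) :: desc i).foldl step (x, 0)).2
    simp only [List.foldl_cons, step_def]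
    by_cases hf : F ((i : Int) + 1) ≤ x
    · -- the greedy index is i+1
      have hfib : F ((i : Int) + 2) = F ((i : Int) + 1) + F (i : Int) := fib_add' i (by omega)
      have hFi_pos : 1 ≤ F (i : Int) := F_pos' i (by omega)
      have hFmono : F (i : Int) ≤ F ((i : Int) + 1) := by
        have h := F_mono' i (i + 1) (by omega) (by omega)
        rwa [hcast] at h
      have hx1 : 1 ≤ x := by omega
      have hK : K x = i + 1 := by
        have hge : i + 1 ≤ K x := by
          apply K_ge x (i + 1) (by omega)
          rw [hcast]
          exact hf
        have hle2 : K x ≤ i + 1 := by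
          by_contra hcon
          have h2 : i + 2 ≤ K x := by omega
          have hm : F ((i : Int) + 2) ≤ F (K x) := by
            have h := F_mono' (i + 2) (K x) h2 (K_le x)
            have e : ((i + 2 : Nat) : Int) = (i : Int) + 2 := by push_cast; ring
            rwa [e] at h
          have := K_spec x hx1
          omega
        omega
      rw [solve_succ x hx1, hK, hcast]
      have hge0 : (i : Int) + 1 - 1 ≥ 0 := by omega
      rw [if_pos hge0, if_pos hf, if_pos (by omega : (i : Int) + 1 ≥ 1)]
      have hx' : 0 ≤ x - F ((i : Int) + 1) := by omega
      have hx'lt : x - F ((i : Int) + 1) < F ((i : Int) + 1) := by omega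
      rw [ih (by omega) (x - F ((i : Int) + 1)) hx' hx'lt]
      have hs := (sweep_shift (desc i) (x - F ((i : Int) + 1)) (0 + F ((i : Int) + 1 - 1))).2
      rw [hs]
      have e : (i : Int) + 1 - 1 = (i : Int) := by ring
      rw [e]
      ring
    · rw [if_neg hf]
      exact ih (by omega) x hx (by omega)

lemma solve_div_aux (t : Nat) : ∀ x : Int, 0 ≤ x → x.toNat ≤ t →
    solve x = PySem.Int.floordiv x 17711 * 10946 + solve (PySem.Int.mod x 17711) := by
  induction t with
  | zero =>
    intro x hx ht
    have hx0 : x = 0 := by omega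
    subst hx0
    decide
  | succ t ih =>
    intro x hx ht
    have hq := PySem.Int.floordiv_mul_add_mod x 17711
    have hr0 : 0 ≤ PySem.Int.mod x 17711 := PySem.Int.mod_nonneg x (by norm_num)
    have hr1 : PySem.Int.mod x 17711 < 17711 := PySem.Int.mod_lt x (by norm_num)
    by_cases hbig : 17711 ≤ x
    · -- greedy takes index 20 once; recurse
      have hK : K x = 20 := by
        have hge : 20 ≤ K x := by
          apply K_ge x 20 (le_refl _)
          have : F ((20 : Nat) : Int) = 17711 := by decide
          rw [this]; exact hbig
        have := K_le x
        omega
      rw [solve_succ x (by omega), hK]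
      have hF20 : F ((20 : Nat) : Int) = 17711 := by decide
      have hF19 : F (((20 : Nat) : Int) - 1) = 10946 := by decide
      rw [hF20, hF19]
      rw [if_pos (by norm_num : ((20 : Nat) : Int) - 1 ≥ 0)]
      rw [ih (x - 17711) (by omega) (by omega)]
      have hq' := PySem.Int.floordiv_mul_add_mod (x - 17711) 17711
      have hr0' : 0 ≤ PySem.Int.mod (x - 17711) 17711 := PySem.Int.mod_nonneg _ (by norm_num)
      have hr1' : PySem.Int.mod (x - 17711) 17711 < 17711 := PySem.Int.mod_lt _ (by norm_num)
      have hdq : PySem.Int.floordiv (x - 17711) 17711 = PySem.Int.floordiv x 17711 - 1 := by omega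
      have hdr : PySem.Int.mod (x - 17711) 17711 = PySem.Int.mod x 17711 := by omega
      rw [hdq, hdr]
      ring
    · have hq0 : PySem.Int.floordiv x 17711 = 0 := by omega
      have hr : PySem.Int.mod x 17711 = x := by omega
      rw [hq0, hr]
      ring

lemma solve_div (x : Int) (hx : 0 ≤ x) :
    solve x = PySem.Int.floordiv x 17711 * 10946 + solve (PySem.Int.mod x 17711) :=
  solve_div_aux x.toNat x hx (le_refl _)

-- ===== VERDICT (by name: the statement is the Claim_ definition above) =====
theorem solve_spec : Claim_equal_solve := by
  intro x _ hx
  show solve x = solve_alt x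
  rw [alt_eq]
  have hF20 : F (((19 : Nat) : Int) + 1) = 17711 := by decide
  by_cases hbig : x ≥ 17711
  · rw [if_pos hbig, if_pos hbig]
    have hr0 : 0 ≤ PySem.Int.mod x 17711 := PySem.Int.mod_nonneg x (by norm_num)
    have hr1 : PySem.Int.mod x 17711 < 17711 := PySem.Int.mod_lt x (by norm_num)
    have hs := (sweep_shift (desc 19) (PySem.Int.mod x 17711)
      (PySem.Int.floordiv x 17711 * 10946)).2
    rw [hs]
    have hm := main_sweep 19 (le_refl _) (PySem.Int.mod x 17711) hr0 (by rw [hF20]; exact hr1)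
    push_cast at hm
    rw [← hm]
    exact solve_div x hx
  · rw [if_neg hbig, if_neg hbig]
    have hm := main_sweep 19 (le_refl _) x hx (by rw [hF20]; omega)
    push_cast at hm
    exact hm
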